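-- pv_equiv track=rewrite | github.com/PIC216/Advent_of_Code | 2023/my_functions.py | find_all_gear_diagonals
-- ===== SOURCE A (Python) =====
-- def get_up_down_index(original_index: list = None, up: bool = True):
--     if up:
--         new_index = [original_index[0]-1, original_index[1]]
--     else:
--         new_index = [original_index[0]+1, original_index[1]]
--     return new_index
--
-- def get_right_left_index(original_index: list = None, left: bool = True):
--     if left:
--         new_index = [original_index[0], original_index[1]-1]
--     else:
--         new_index = [original_index[0], original_index[1]+1]
--     return new_index
--
-- def order_indexes(index_list: list = None, max_row_=9, max_col_=9):
--     ordered_list = []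
--     for r in range(max_row_+1):
--         for c in range(max_col_+1):
--             if [r, c] in index_list:
--                 ordered_list.append([r, c])
--     return ordered_list
--
-- def get_diagonals(original_index: list = None, max_row_=9, max_col_=9):
--     diagonals = []
--     # get ups and downs
--     if original_index[0] == 0:
--         diagonals.append(get_up_down_index(original_index, up=False))
--     elif original_index[0] == max_row_:
--         diagonals.append(get_up_down_index(original_index, up=True))
--     else:
--         diagonals.append(get_up_down_index(original_index, up=False))
--         diagonals.append(get_up_down_index(original_index, up=True))
--     # get lefts and rights
--     if original_index[1] == 0:
--         diagonals.append(get_right_left_index(original_index, left=False))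
--     elif original_index[1] == max_col_:
--         diagonals.append(get_right_left_index(original_index, left=True))
--     else:
--         diagonals.append(get_right_left_index(original_index, left=False))
--         diagonals.append(get_right_left_index(original_index, left=True))
--     # get diagonals
--     if original_index[0] == 0:
--         if original_index[1] == 0:
--             diagonals.append(get_up_down_index(get_right_left_index(original_index, left=False), up=False))
--         elif original_index[1] == max_col_:
--             diagonals.append(get_up_down_index(get_right_left_index(original_index, left=True), up=False))
--         else:
--             diagonals.append(get_up_down_index(get_right_left_index(original_index, left=False), up=False))
--             diagonals.append(get_up_down_index(get_right_left_index(original_index, left=True), up=False))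
--     elif original_index[0] == max_row_:
--         if original_index[1] == 0:
--             diagonals.append(get_up_down_index(get_right_left_index(original_index, left=False), up=True))
--         elif original_index[1] == max_col_:
--             diagonals.append(get_up_down_index(get_right_left_index(original_index, left=True), up=True))
--         else:
--             diagonals.append(get_up_down_index(get_right_left_index(original_index, left=False), up=True))
--             diagonals.append(get_up_down_index(get_right_left_index(original_index, left=True), up=True))
--     else:
--         if original_index[1] == 0:
--             diagonals.append(get_up_down_index(get_right_left_index(original_index, left=False), up=True))
--             diagonals.append(get_up_down_index(get_right_left_index(original_index, left=False), up=False))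
--         elif original_index[1] == max_col_:
--             diagonals.append(get_up_down_index(get_right_left_index(original_index, left=True), up=True))
--             diagonals.append(get_up_down_index(get_right_left_index(original_index, left=True), up=False))
--         else:
--             diagonals.append(get_up_down_index(get_right_left_index(original_index, left=False), up=True))
--             diagonals.append(get_up_down_index(get_right_left_index(original_index, left=False), up=False))
--             diagonals.append(get_up_down_index(get_right_left_index(original_index, left=True), up=True))
--             diagonals.append(get_up_down_index(get_right_left_index(original_index, left=True), up=False))
--     return order_indexes(diagonals, max_row_, max_col_)
--
-- def find_all_gear_diagonals(list_of_indices: list = None, max_row=9, max_col=9):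
--     symbol_diagonals = []
--     for index in list_of_indices:
--         gear_diagonal_group = []
--         diagonals = get_diagonals(index, max_row, max_col)
--         for diagonal_index in diagonals:
--             if diagonal_index not in symbol_diagonals:
--                 gear_diagonal_group.append(diagonal_index)
--         symbol_diagonals.append(gear_diagonal_group)
--     return symbol_diagonals
-- ===== SOURCE B (Python) =====
-- def find_all_gear_diagonals(list_of_indices: list = None, max_row=9, max_col=9):
--     # Each gear's group is just its in-bounds 8-neighborhood in row-major order,
--     # generated directly in sorted order (no grid scan, no cross-group lookup:
--     # A's membership test compares a coordinate against whole groups and never matches).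
--     result = []
--     for index in list_of_indices:
--         r, c = index[0], index[1]
--         result.append([[r + dr, c + dc]
--                        for dr in (-1, 0, 1) for dc in (-1, 0, 1)
--                        if (dr != 0 or dc != 0)
--                        and 0 <= r + dr <= max_row and 0 <= c + dc <= max_col])
--     return result
-- ===== Notes on version B (the rewrite author's own statement) =====
-- stated objective: faster
-- what changed: B emits each gear's in-bounds 8-neighborhood directly in row-major order (O(1) work per gear) instead of A's order_indexes scan of the whole (max_row+1)x(max_col+1) grid per gear, and drops A's cross-group membership test, which compares a 2-int coordinate against whole groups and can never match.
import Mathlib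
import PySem

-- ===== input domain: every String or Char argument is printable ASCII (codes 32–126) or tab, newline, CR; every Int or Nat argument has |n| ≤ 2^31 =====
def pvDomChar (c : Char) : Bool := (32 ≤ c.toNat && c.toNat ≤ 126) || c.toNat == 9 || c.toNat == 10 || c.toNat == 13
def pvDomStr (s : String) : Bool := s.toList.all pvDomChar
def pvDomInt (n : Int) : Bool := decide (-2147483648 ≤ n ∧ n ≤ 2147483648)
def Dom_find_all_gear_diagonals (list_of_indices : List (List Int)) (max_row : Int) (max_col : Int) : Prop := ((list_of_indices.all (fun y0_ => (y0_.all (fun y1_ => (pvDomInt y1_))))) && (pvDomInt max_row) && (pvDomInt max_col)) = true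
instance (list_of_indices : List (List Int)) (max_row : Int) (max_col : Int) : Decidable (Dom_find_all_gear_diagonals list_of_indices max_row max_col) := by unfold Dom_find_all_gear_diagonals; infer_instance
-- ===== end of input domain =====

-- B replaces A's per-gear full-grid scan by direct row-major generation of the in-bounds
-- 8-neighborhood and drops A's type-confused cross-group membership test (it never matches);
-- objective: faster (asymptotic, O(1) vs O(R*C) per gear).

-- ===== PORT A =====
def get_up_down_index (original_index : List Int) (up : Bool) : List Int :=
  if up then [PySem.List.pyGetD original_index 0 0 - 1, PySem.List.pyGetD original_index 1 0]
  else [PySem.List.pyGetD original_index 0 0 + 1, PySem.List.pyGetD original_index 1 0]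

def get_right_left_index (original_index : List Int) (left : Bool) : List Int :=
  if left then [PySem.List.pyGetD original_index 0 0, PySem.List.pyGetD original_index 1 0 - 1]
  else [PySem.List.pyGetD original_index 0 0, PySem.List.pyGetD original_index 1 0 + 1]

def order_indexes (index_list : List (List Int)) (max_row_ max_col_ : Int) : List (List Int) :=
  (PySem.List.pyRange 0 (max_row_ + 1) 1).foldl (fun ol r =>
    (PySem.List.pyRange 0 (max_col_ + 1) 1).foldl (fun ol c =>
      if [r, c] ∈ index_list then ol ++ [[r, c]] else ol) ol) []

def get_diagonals (original_index : List Int) (max_row_ max_col_ : Int) : List (List Int) :=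
  let r := PySem.List.pyGetD original_index 0 0
  let c := PySem.List.pyGetD original_index 1 0
  let d1 : List (List Int) :=
    if r = 0 then [get_up_down_index original_index false]
    else if r = max_row_ then [get_up_down_index original_index true]
    else [get_up_down_index original_index false, get_up_down_index original_index true]
  let d2 : List (List Int) :=
    if c = 0 then [get_right_left_index original_index false]
    else if c = max_col_ then [get_right_left_index original_index true]
    else [get_right_left_index original_index false, get_right_left_index original_index true]
  let d3 : List (List Int) :=
    if r = 0 then
      (if c = 0 then [get_up_down_index (get_right_left_index original_index false) false]
       else if c = max_col_ then [get_up_down_index (get_right_left_index original_index true) false]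
       else [get_up_down_index (get_right_left_index original_index false) false,
             get_up_down_index (get_right_left_index original_index true) false])
    else if r = max_row_ then
      (if c = 0 then [get_up_down_index (get_right_left_index original_index false) true]
       else if c = max_col_ then [get_up_down_index (get_right_left_index original_index true) true]
       else [get_up_down_index (get_right_left_index original_index false) true,
             get_up_down_index (get_right_left_index original_index true) true])
    else
      (if c = 0 then [get_up_down_index (get_right_left_index original_index false) true,
                      get_up_down_index (get_right_left_index original_index false) false]
       else if c = max_col_ then [get_up_down_index (get_right_left_index original_index true) true,
                                  get_up_down_index (get_right_left_index original_index true) false]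
       else [get_up_down_index (get_right_left_index original_index false) true,
             get_up_down_index (get_right_left_index original_index false) false,
             get_up_down_index (get_right_left_index original_index true) true,
             get_up_down_index (get_right_left_index original_index true) false])
  order_indexes (d1 ++ d2 ++ d3) max_row_ max_col_

-- Python '==' between an int and a list is always False (exact: CPython returns NotImplemented on both sides, falls back to identity/False)
def pyIntEqList (_ : Int) (_ : List Int) : Bool := false

-- Python '==' between the coordinate list [r, c] (ints) and a group (a list of lists): elementwise, lengths first
def pyCoordEqGroup (x : List Int) (g : List (List Int)) : Bool :=
  (x.length == g.length) && (x.zip g).all (fun p => pyIntEqList p.1 p.2)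

def find_all_gear_diagonals (list_of_indices : List (List Int)) (max_row : Int) (max_col : Int) : List (List (List Int)) :=
  list_of_indices.foldl (fun symbol_diagonals index =>
    let diagonals := get_diagonals index max_row max_col
    let gear_diagonal_group := diagonals.foldl (fun g diagonal_index =>
      if symbol_diagonals.any (fun s => pyCoordEqGroup diagonal_index s) then g
      else g ++ [diagonal_index]) []
    symbol_diagonals ++ [gear_diagonal_group]) []

-- ===== PORT B =====
def pvNeighbors (r c max_row max_col : Int) : List (List Int) :=
  ([-1, 0, 1] : List Int).flatMap (fun dr =>
    ([-1, 0, 1] : List Int).flatMap (fun dc =>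
      if (dr ≠ 0 ∨ dc ≠ 0) ∧ 0 ≤ r + dr ∧ r + dr ≤ max_row ∧ 0 ≤ c + dc ∧ c + dc ≤ max_col
      then [[r + dr, c + dc]] else []))

def find_all_gear_diagonals_alt (list_of_indices : List (List Int)) (max_row : Int) (max_col : Int) : List (List (List Int)) :=
  list_of_indices.foldl (fun result index =>
    result ++ [pvNeighbors (PySem.List.pyGetD index 0 0) (PySem.List.pyGetD index 1 0) max_row max_col]) []

-- ===== PRECONDITION & SPEC =====
-- Pre_ excludes exactly the inputs on which Python A raises IndexError: an index list with
-- fewer than two entries (index[0]/index[1] are read unconditionally).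
def Pre_find_all_gear_diagonals (list_of_indices : List (List Int)) (max_row : Int) (max_col : Int) : Prop :=
  ∀ l ∈ list_of_indices, 2 ≤ l.length
instance (list_of_indices : List (List Int)) (max_row : Int) (max_col : Int) : Decidable (Pre_find_all_gear_diagonals list_of_indices max_row max_col) := by unfold Pre_find_all_gear_diagonals; infer_instance

def pvWitness_find_all_gear_diagonals : List (List Int) × Int × Int := ([[1, 1], [0, 0]], 3, 3)

def Spec_find_all_gear_diagonals (list_of_indices : List (List Int)) (max_row : Int) (max_col : Int) (out : List (List (List Int))) : Prop := out = find_all_gear_diagonals_alt list_of_indices max_row max_col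
instance (list_of_indices : List (List Int)) (max_row : Int) (max_col : Int) (out : List (List (List Int))) : Decidable (Spec_find_all_gear_diagonals list_of_indices max_row max_col out) := by unfold Spec_find_all_gear_diagonals; infer_instance

-- ===== CLAIM (what is proved, stated in full; the proofs are below) =====
def Claim_equal_find_all_gear_diagonals : Prop := ∀ (list_of_indices : List (List Int)) (max_row : Int) (max_col : Int), Dom_find_all_gear_diagonals list_of_indices max_row max_col → Pre_find_all_gear_diagonals list_of_indices max_row max_col → Spec_find_all_gear_diagonals list_of_indices max_row max_col (find_all_gear_diagonals list_of_indices max_row max_col)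

-- ===== LEMMAS AND PROOFS =====

-- strict row-major (lexicographic) order on [row, col] coordinates
def pvLtc (x y : List Int) : Prop :=
  x.headI < y.headI ∨ (x.headI = y.headI ∧ x.tail.headI < y.tail.headI)

-- the full grid, in the row-major order order_indexes enumerates it
def pvGrid (mr mc : Int) : List (List Int) :=
  (PySem.List.pyRange 0 (mr + 1) 1).flatMap (fun r =>
    (PySem.List.pyRange 0 (mc + 1) 1).map (fun c => [r, c]))

lemma pvLtc_asymm {x y : List Int} (h1 : pvLtc x y) (h2 : pvLtc y x) : False := by
  unfold pvLtc at h1 h2; omega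

lemma pv_eq_of_pairwise_mem : ∀ (l1 l2 : List (List Int)), l1.Pairwise pvLtc → l2.Pairwise pvLtc →
    (∀ x, x ∈ l1 ↔ x ∈ l2) → l1 = l2 := by
  intro l1
  induction l1 with
  | nil => intro l2 _ _ hm; cases l2 with
    | nil => rfl
    | cons b t2 => exact absurd ((hm b).2 (List.mem_cons_self)) (List.not_mem_nil)
  | cons a t1 ih =>
    intro l2 h1 h2 hm
    cases l2 with
    | nil => exact absurd ((hm a).1 (List.mem_cons_self)) (List.not_mem_nil)
    | cons b t2 =>
      have hab : a = b := by
        rcases List.mem_cons.mp ((hm a).1 (List.mem_cons_self)) with h | h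
        · exact h
        · rcases List.mem_cons.mp ((hm b).2 (List.mem_cons_self)) with h' | h'
          · exact h'.symm
          · exact absurd (List.rel_of_pairwise_cons h2 h)
              (fun hba => pvLtc_asymm (List.rel_of_pairwise_cons h1 h') hba)
      subst hab
      have ht : ∀ x, x ∈ t1 ↔ x ∈ t2 := by
        intro x
        constructor
        · intro hx
          rcases List.mem_cons.mp ((hm x).1 (List.mem_cons_of_mem _ hx)) with h | h
          · exact absurd (List.rel_of_pairwise_cons h1 hx) (by simp [h, pvLtc])
          · exact h
        · intro hx
          rcases List.mem_cons.mp ((hm x).2 (List.mem_cons_of_mem _ hx)) with h | h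
          · exact absurd (List.rel_of_pairwise_cons h2 hx) (by simp [h, pvLtc])
          · exact h
      exact congrArg (a :: ·) (ih t2 h1.of_cons h2.of_cons ht)

lemma pv_mem_grid (mr mc : Int) (x : List Int) :
    x ∈ pvGrid mr mc ↔ ∃ a b, x = [a, b] ∧ 0 ≤ a ∧ a ≤ mr ∧ 0 ≤ b ∧ b ≤ mc := by
  simp only [pvGrid, List.mem_flatMap, List.mem_map, PySem.List.mem_pyRange_one]
  constructor
  · rintro ⟨r, ⟨hr0, hr1⟩, c, ⟨hc0, hc1⟩, rfl⟩
    exact ⟨r, c, rfl, by omega, by omega, by omega, by omega⟩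
  · rintro ⟨a, b, rfl, h1, h2, h3, h4⟩
    exact ⟨a, ⟨by omega, by omega⟩, b, ⟨by omega, by omega⟩, rfl⟩

lemma pv_pairwise_grid (mr mc : Int) : (pvGrid mr mc).Pairwise pvLtc := by
  unfold pvGrid
  rw [List.flatMap_def, List.pairwise_flatten]
  refine ⟨?_, ?_⟩
  · intro l hl
    simp only [List.mem_map] at hl
    obtain ⟨r, _, rfl⟩ := hl
    rw [List.pairwise_map]
    exact (PySem.List.pairwise_lt_pyRange_one 0 (mc + 1)).imp
      (fun {c1 c2} h => by simp [pvLtc]; omega)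
  · rw [List.pairwise_map]
    exact (PySem.List.pairwise_lt_pyRange_one 0 (mr + 1)).imp
      (fun {r1 r2} h => by
        intro x hx y hy
        simp only [List.mem_map] at hx hy
        obtain ⟨c1, _, rfl⟩ := hx
        obtain ⟨c2, _, rfl⟩ := hy
        simp [pvLtc]; omega)

lemma pv_order_indexes_eq_filter (il : List (List Int)) (mr mc : Int) :
    order_indexes il mr mc = (pvGrid mr mc).filter (fun x => decide (x ∈ il)) := by
  unfold order_indexes pvGrid
  have hinner : ∀ (r : Int) (ol : List (List Int)),
      (PySem.List.pyRange 0 (mc + 1) 1).foldl (fun ol c =>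
        if [r, c] ∈ il then ol ++ [[r, c]] else ol) ol
      = ol ++ ((PySem.List.pyRange 0 (mc + 1) 1).map (fun c => [r, c])).filter
          (fun x => decide (x ∈ il)) := by
    intro r ol
    rw [← List.foldl_map (f := fun c => [r, c])
      (g := fun ol x => if x ∈ il then ol ++ [x] else ol)]
    rw [PySem.List.foldl_append_ite_eq_filter]
  calc (PySem.List.pyRange 0 (mr + 1) 1).foldl (fun ol r =>
        (PySem.List.pyRange 0 (mc + 1) 1).foldl (fun ol c =>
          if [r, c] ∈ il then ol ++ [[r, c]] else ol) ol) []
      = (PySem.List.pyRange 0 (mr + 1) 1).foldl (fun ol r =>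
          ol ++ ((PySem.List.pyRange 0 (mc + 1) 1).map (fun c => [r, c])).filter
            (fun x => decide (x ∈ il))) [] := by
        exact PySem.List.foldl_congr_mem _ _ _ _ (fun ol r _ => hinner r ol)
    _ = (PySem.List.pyRange 0 (mr + 1) 1).flatMap (fun r =>
          ((PySem.List.pyRange 0 (mc + 1) 1).map (fun c => [r, c])).filter
            (fun x => decide (x ∈ il))) := by
        rw [PySem.List.foldl_append_eq_flatMap]; rfl
    _ = _ := by
        rw [List.filter_flatMap]

-- proof-side copy of the candidate list get_diagonals builds (definitional: get_diagonals = order_indexes of it)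
def pvCands (original_index : List Int) (max_row_ max_col_ : Int) : List (List Int) :=
  let r := PySem.List.pyGetD original_index 0 0
  let c := PySem.List.pyGetD original_index 1 0
  let d1 : List (List Int) :=
    if r = 0 then [get_up_down_index original_index false]
    else if r = max_row_ then [get_up_down_index original_index true]
    else [get_up_down_index original_index false, get_up_down_index original_index true]
  let d2 : List (List Int) :=
    if c = 0 then [get_right_left_index original_index false]
    else if c = max_col_ then [get_right_left_index original_index true]
    else [get_right_left_index original_index false, get_right_left_index original_index true]
  let d3 : List (List Int) :=
    if r = 0 then
      (if c = 0 then [get_up_down_index (get_right_left_index original_index false) false]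
       else if c = max_col_ then [get_up_down_index (get_right_left_index original_index true) false]
       else [get_up_down_index (get_right_left_index original_index false) false,
             get_up_down_index (get_right_left_index original_index true) false])
    else if r = max_row_ then
      (if c = 0 then [get_up_down_index (get_right_left_index original_index false) true]
       else if c = max_col_ then [get_up_down_index (get_right_left_index original_index true) true]
       else [get_up_down_index (get_right_left_index original_index false) true,
             get_up_down_index (get_right_left_index original_index true) true])
    else
      (if c = 0 then [get_up_down_index (get_right_left_index original_index false) true,
                      get_up_down_index (get_right_left_index original_index false) false]
       else if c = max_col_ then [get_up_down_index (get_right_left_index original_index true) true,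
                                  get_up_down_index (get_right_left_index original_index true) false]
       else [get_up_down_index (get_right_left_index original_index false) true,
             get_up_down_index (get_right_left_index original_index false) false,
             get_up_down_index (get_right_left_index original_index true) true,
             get_up_down_index (get_right_left_index original_index true) false])
  d1 ++ d2 ++ d3

lemma pv_get_diagonals_def (oi : List Int) (mr mc : Int) :
    get_diagonals oi mr mc = order_indexes (pvCands oi mr mc) mr mc := rfl

lemma pv_getD_pair0 (x y : Int) : PySem.List.pyGetD [x, y] 0 0 = x := rfl
lemma pv_getD_pair1 (x y : Int) : PySem.List.pyGetD [x, y] 1 0 = y := rfl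

lemma pv_mem_cands_bounds (oi : List Int) (mr mc : Int) (x : List Int) :
    (x ∈ pvCands oi mr mc ∧ ∃ a b, x = [a, b] ∧ 0 ≤ a ∧ a ≤ mr ∧ 0 ≤ b ∧ b ≤ mc) ↔
    ∃ a b, x = [a, b] ∧ 0 ≤ a ∧ a ≤ mr ∧ 0 ≤ b ∧ b ≤ mc ∧
      -1 ≤ a - PySem.List.pyGetD oi 0 0 ∧ a - PySem.List.pyGetD oi 0 0 ≤ 1 ∧
      -1 ≤ b - PySem.List.pyGetD oi 1 0 ∧ b - PySem.List.pyGetD oi 1 0 ≤ 1 ∧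
      ¬(a = PySem.List.pyGetD oi 0 0 ∧ b = PySem.List.pyGetD oi 1 0) := by
  simp only [pvCands, get_up_down_index, get_right_left_index, if_true, if_false,
    Bool.false_eq_true, pv_getD_pair0, pv_getD_pair1]
  generalize PySem.List.pyGetD oi 0 0 = r
  generalize PySem.List.pyGetD oi 1 0 = c
  split_ifs <;>
  · constructor
    · rintro ⟨hx, a, b, rfl, h1, h2, h3, h4⟩
      simp only [List.mem_append, List.mem_cons, List.not_mem_nil, or_false,
        List.cons.injEq, and_true] at hx
      exact ⟨a, b, rfl, h1, h2, h3, h4, by omega, by omega, by omega, by omega, by omega⟩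
    · rintro ⟨a, b, rfl, h1, h2, h3, h4, h5, h6, h7, h8, h9⟩
      refine ⟨?_, a, b, rfl, h1, h2, h3, h4⟩
      simp only [List.mem_append, List.mem_cons, List.not_mem_nil, or_false,
        List.cons.injEq, and_true]
      omega

lemma pv_mem_neighbors (r c mr mc : Int) (x : List Int) :
    x ∈ pvNeighbors r c mr mc ↔
    ∃ a b, x = [a, b] ∧ 0 ≤ a ∧ a ≤ mr ∧ 0 ≤ b ∧ b ≤ mc ∧
      -1 ≤ a - r ∧ a - r ≤ 1 ∧ -1 ≤ b - c ∧ b - c ≤ 1 ∧ ¬(a = r ∧ b = c) := by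
  simp only [pvNeighbors, List.mem_flatMap, List.mem_ite_nil_right, List.mem_cons,
    List.not_mem_nil, or_false]
  constructor
  · rintro ⟨dr, hdr, dc, hdc, ⟨hne, hb1, hb2, hb3, hb4⟩, rfl⟩
    exact ⟨r + dr, c + dc, rfl, by omega, by omega, by omega, by omega,
      by omega, by omega, by omega, by omega, by omega⟩
  · rintro ⟨a, b, rfl, h1, h2, h3, h4, h5, h6, h7, h8, h9⟩
    refine ⟨a - r, ?_, b - c, ?_, ⟨by omega, by omega, by omega, by omega, by omega⟩, ?_⟩
    · omega
    · omega
    · simp only [List.cons.injEq, and_true]; constructor <;> omega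

lemma pv_pairwise_flatMap (l : List Int) (f : Int → List (List Int))
    (hl : l.Pairwise (· < ·)) (hin : ∀ a ∈ l, (f a).Pairwise pvLtc)
    (hcross : ∀ a b : Int, a < b → ∀ x ∈ f a, ∀ y ∈ f b, pvLtc x y) :
    (l.flatMap f).Pairwise pvLtc := by
  rw [List.flatMap_def, List.pairwise_flatten]
  refine ⟨?_, ?_⟩
  · intro bl hbl
    obtain ⟨a, ha, rfl⟩ := List.mem_map.mp hbl
    exact hin a ha
  · rw [List.pairwise_map]
    exact hl.imp (fun {a b} h => hcross a b h)

lemma pv_pairwise_neighbors (r c mr mc : Int) : (pvNeighbors r c mr mc).Pairwise pvLtc := by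
  unfold pvNeighbors
  apply pv_pairwise_flatMap
  · decide
  · intro dr _
    apply pv_pairwise_flatMap
    · decide
    · intro dc _
      split <;> simp
    · intro a b hab x hx y hy
      rw [List.mem_ite_nil_right] at hx hy
      rcases hx with ⟨_, hx⟩; rcases hy with ⟨_, hy⟩
      simp only [List.mem_cons, List.not_mem_nil, or_false] at hx hy
      subst hx; subst hy
      simp [pvLtc]; omega
  · intro a b hab x hx y hy
    simp only [List.mem_flatMap, List.mem_ite_nil_right, List.mem_cons,
      List.not_mem_nil, or_false] at hx hy
    obtain ⟨dc1, _, _, rfl⟩ := hx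
    obtain ⟨dc2, _, _, rfl⟩ := hy
    simp [pvLtc]; omega

lemma pv_get_diagonals_eq (oi : List Int) (mr mc : Int) :
    get_diagonals oi mr mc
      = pvNeighbors (PySem.List.pyGetD oi 0 0) (PySem.List.pyGetD oi 1 0) mr mc := by
  rw [pv_get_diagonals_def, pv_order_indexes_eq_filter]
  apply pv_eq_of_pairwise_mem
  · exact (pv_pairwise_grid mr mc).filter _
  · exact pv_pairwise_neighbors _ _ _ _
  · intro x
    rw [List.mem_filter, pv_mem_neighbors, decide_eq_true_eq, pv_mem_grid,
      ← pv_mem_cands_bounds]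
    tauto

lemma pv_coordEqGroup_false (a : Int) (t : List Int) (g : List (List Int)) :
    pyCoordEqGroup (a :: t) g = false := by
  cases g <;> simp [pyCoordEqGroup, pyIntEqList]

lemma pv_mem_get_diagonals_shape (oi : List Int) (mr mc : Int) (x : List Int)
    (hx : x ∈ get_diagonals oi mr mc) : ∃ a b, x = [a, b] := by
  rw [pv_get_diagonals_eq, pv_mem_neighbors] at hx
  obtain ⟨a, b, rfl, _⟩ := hx
  exact ⟨a, b, rfl⟩

lemma pv_find_eq_map (lst : List (List Int)) (mr mc : Int) :
    find_all_gear_diagonals lst mr mc = lst.map (fun idx => get_diagonals idx mr mc) := by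
  unfold find_all_gear_diagonals
  have h : ∀ (sym : List (List (List Int))), ∀ idx ∈ lst,
      (fun (symbol_diagonals : List (List (List Int))) index =>
        symbol_diagonals ++ [(get_diagonals index mr mc).foldl (fun g diagonal_index =>
          if symbol_diagonals.any (fun s => pyCoordEqGroup diagonal_index s) then g
          else g ++ [diagonal_index]) []]) sym idx
      = sym ++ [get_diagonals idx mr mc] := by
    intro sym idx _
    simp only [List.append_cancel_left_eq, List.cons.injEq, and_true]
    have hb : (get_diagonals idx mr mc).foldl (fun g diagonal_index =>
        if sym.any (fun s => pyCoordEqGroup diagonal_index s) then g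
        else g ++ [diagonal_index]) []
        = (get_diagonals idx mr mc).foldl (fun g diagonal_index => g ++ [diagonal_index]) [] := by
      apply PySem.List.foldl_congr_mem
      intro acc d hd
      obtain ⟨a, b, rfl⟩ := pv_mem_get_diagonals_shape idx mr mc d hd
      simp [pv_coordEqGroup_false]
    rw [hb, PySem.List.foldl_append_singleton_eq_self, List.nil_append]
  rw [PySem.List.foldl_congr_mem _ _ _ _ h, PySem.List.foldl_append_singleton_eq_map,
    List.nil_append]

lemma pv_alt_eq_map (lst : List (List Int)) (mr mc : Int) :
    find_all_gear_diagonals_alt lst mr mc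
      = lst.map (fun idx => pvNeighbors (PySem.List.pyGetD idx 0 0)
          (PySem.List.pyGetD idx 1 0) mr mc) := by
  unfold find_all_gear_diagonals_alt
  rw [PySem.List.foldl_append_singleton_eq_map, List.nil_append]

-- ===== VERDICT (by name: the statement is the Claim_ definition above) =====
theorem find_all_gear_diagonals_spec : Claim_equal_find_all_gear_diagonals := by
  intro lst mr mc _ _
  unfold Spec_find_all_gear_diagonals
  rw [pv_find_eq_map, pv_alt_eq_map]
  exact List.map_congr_left (fun idx _ => pv_get_diagonals_eq idx mr mc)
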